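-- pv_equiv track=rewrite | github.com/Chant00/coding | leet/二分查找/[4]寻找两个正序数组的中位数.py | getKthElement
-- ===== SOURCE A (Python) =====
-- from typing import List
--
-- def getKthElement(nums1: List[int], nums2: List[int], k) -> float:
--     """O(log(m+n)) 官方题解
--     - 主要思路：要找到第 k (k>1) 小的元素，那么就取 pivot1 = nums1[k/2-1] 和 pivot2 = nums2[k/2-1] 进行比较
--     - 这里的 "/" 表示整除
--     - nums1 中小于等于 pivot1 的元素有 nums1[0 .. k/2-2] 共计 k/2-1 个
--     - nums2 中小于等于 pivot2 的元素有 nums2[0 .. k/2-2] 共计 k/2-1 个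
--     - 取 pivot = min(pivot1, pivot2)，两个数组中小于等于 pivot 的元素共计不会超过 (k/2-1) + (k/2-1) <= k-2 个
--     - 这样 pivot 本身最大也只能是第 k-1 小的元素
--     - 如果 pivot = pivot1，那么 nums1[0 .. k/2-1] 都不可能是第 k 小的元素。把这些元素全部 "删除"，剩下的作为新的 nums1 数组
--     - 如果 pivot = pivot2，那么 nums2[0 .. k/2-1] 都不可能是第 k 小的元素。把这些元素全部 "删除"，剩下的作为新的 nums2 数组
--     - 由于我们 "删除" 了一些元素（这些元素都比第 k 小的元素要小），因此需要修改 k 的值，减去删除的数的个数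
--
--     注意边界情况， i，j，k三者都有，k==1容易被忽略
--     """
--     m, n = len(nums1), len(nums2)
--     i, j = 0, 0
--     while True:
--         # 边界情况，只需按照i, j = 0, 0的时候考虑就行
--         if i == m:
--             return nums2[j + k - 1]
--         if j == n:
--             return nums1[i + k - 1]
--         if k == 1:  # 注意：这个容易忘记
--             return min(nums1[i], nums2[j])
--         # 正常情况
--         i_new = min(i + k // 2 - 1, m - 1)  # 防止数组越界
--         j_new = min(j + k // 2 - 1, n - 1)
--         # nums1[new_i1] == nums2[new_i2]时，当做以下2者中任意情况处理即可，但是不能单独处理为既删除nums1又删除nums2,会死循环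
--         if nums1[i_new] <= nums2[j_new]:
--             # k -= k // 2 # 不能这么写，因为 new_i1 可能取值为m - 1，这时候删除的个数就不是k // 2个，new_i1 - i1 + 1才是绝对正确的
--             # 注意: 这里要先更新k再更新i
--             k -= i_new - i + 1
--             i = i_new + 1
--         else:
--             k -= j_new - j + 1
--             j = j_new + 1
-- ===== SOURCE B (Python) =====
-- def getKthElement(nums1, nums2, k):
--     if not nums1:
--         return nums2[k - 1]
--     if not nums2:
--         return nums1[k - 1]
--     x, y = nums1[0], nums2[0]
--     if k == 1:
--         return x if x <= y else y
--     t1 = min(k // 2, len(nums1))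
--     t2 = min(k // 2, len(nums2))
--     if nums1[t1 - 1] <= nums2[t2 - 1]:
--         return getKthElement(nums1[t1:], nums2, k - t1)
--     return getKthElement(nums1, nums2[t2:], k - t2)
-- ===== Notes on version B (the rewrite author's own statement) =====
-- stated objective: simpler
-- what changed: A's single while-loop over mutable cursor indices (i, j) into the full arrays is replaced by a direct structural recursion on the two lists with explicit base cases, which slices the consumed prefix off one array and reduces k by the number of elements discarded.
-- outside the precondition, e.g. on getKthElement([], [5], 0): A returns 5, B returns 5; on getKthElement([1], [2], 5): A raises IndexError, B raises IndexError
import Mathlib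
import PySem

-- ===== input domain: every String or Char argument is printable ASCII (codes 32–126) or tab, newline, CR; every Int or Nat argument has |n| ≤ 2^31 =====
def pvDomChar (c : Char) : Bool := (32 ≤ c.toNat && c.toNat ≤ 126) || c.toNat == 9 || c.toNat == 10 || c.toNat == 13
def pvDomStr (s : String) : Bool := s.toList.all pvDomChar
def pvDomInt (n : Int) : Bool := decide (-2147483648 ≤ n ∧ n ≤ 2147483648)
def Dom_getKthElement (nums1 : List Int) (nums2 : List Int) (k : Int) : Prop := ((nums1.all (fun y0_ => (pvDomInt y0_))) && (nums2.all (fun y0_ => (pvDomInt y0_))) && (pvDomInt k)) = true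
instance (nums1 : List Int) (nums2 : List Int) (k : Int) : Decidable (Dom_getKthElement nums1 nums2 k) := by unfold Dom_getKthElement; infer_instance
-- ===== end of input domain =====

-- B replaces A's index-juggling while-loop over (i, j, k) by a structural recursion on the
-- two lists themselves that slices off the consumed prefix (objective: simpler).

-- ===== PORT A =====
-- A's `while True` loop over state (i, j, k); fuel only makes the loop total in Lean —
-- inside Pre_ the loop runs at most k iterations, so fuel k.toNat + 1 never runs out there.
def pvLoopA (nums1 nums2 : List Int) (m n : Int) : Nat → Int → Int → Int → Int
  | 0, _, _, _ => 0
  | fuel + 1, i, j, k =>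
    if i = m then (PySem.List.pyGet? nums2 (j + k - 1)).getD 0
    else if j = n then (PySem.List.pyGet? nums1 (i + k - 1)).getD 0
    else if k = 1 then
      min ((PySem.List.pyGet? nums1 i).getD 0) ((PySem.List.pyGet? nums2 j).getD 0)
    else
      let iNew := min (i + PySem.Int.floordiv k 2 - 1) (m - 1)
      let jNew := min (j + PySem.Int.floordiv k 2 - 1) (n - 1)
      if (PySem.List.pyGet? nums1 iNew).getD 0 ≤ (PySem.List.pyGet? nums2 jNew).getD 0 then
        pvLoopA nums1 nums2 m n fuel (iNew + 1) j (k - (iNew - i + 1))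
      else
        pvLoopA nums1 nums2 m n fuel i (jNew + 1) (k - (jNew - j + 1))

def getKthElement (nums1 : List Int) (nums2 : List Int) (k : Int) : Int :=
  pvLoopA nums1 nums2 (nums1.length : Int) (nums2.length : Int) (k.toNat + 1) 0 0 k

-- ===== PORT B =====
-- Source B's recursion on the two lists; inside Pre_ k ≥ 1 and every index and subtraction is
-- nonnegative and in range, so Nat arithmetic and List.getD/List.drop are exact there.
-- Fuel = total length: every recursive call drops at least one element.
def pvKthB : Nat → List Int → List Int → Nat → Int
  | _, [], b, k => b.getD (k - 1) 0
  | _, x :: a', [], k => (x :: a').getD (k - 1) 0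
  | 0, _ :: _, _ :: _, _ => 0
  | fuel + 1, x :: a', y :: b', k =>
    if k = 1 then (if x ≤ y then x else y)
    else
      let t1 := min (k / 2) (a'.length + 1)
      let t2 := min (k / 2) (b'.length + 1)
      if (x :: a').getD (t1 - 1) 0 ≤ (y :: b').getD (t2 - 1) 0 then
        pvKthB fuel ((x :: a').drop t1) (y :: b') (k - t1)
      else
        pvKthB fuel (x :: a') ((y :: b').drop t2) (k - t2)

def getKthElement_alt (nums1 : List Int) (nums2 : List Int) (k : Int) : Int :=
  pvKthB (nums1.length + nums2.length) nums1 nums2 k.toNat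

-- ===== PRECONDITION & SPEC =====
-- Pre_ is the task's natural domain 1 ≤ k ≤ m + n. Outside it A either raises IndexError
-- (k too large), diverges (k ≤ 0 with both lists nonempty), or returns a value only through
-- Python's negative-index wraparound (k ≤ 0 with one list empty) — an accident of indexing
-- that is no part of "kth smallest", so those inputs are excluded rather than specified.
def Pre_getKthElement (nums1 : List Int) (nums2 : List Int) (k : Int) : Prop :=
  1 ≤ k ∧ k ≤ (nums1.length : Int) + (nums2.length : Int)
instance (nums1 : List Int) (nums2 : List Int) (k : Int) : Decidable (Pre_getKthElement nums1 nums2 k) := by unfold Pre_getKthElement; infer_instance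

def pvWitness_getKthElement : List Int × List Int × Int := ([1, 3, 8], [2, 4], 4)

def Spec_getKthElement (nums1 : List Int) (nums2 : List Int) (k : Int) (out : Int) : Prop := out = getKthElement_alt nums1 nums2 k
instance (nums1 : List Int) (nums2 : List Int) (k : Int) (out : Int) : Decidable (Spec_getKthElement nums1 nums2 k out) := by unfold Spec_getKthElement; infer_instance

-- ===== CLAIM (what is proved, stated in full; the proofs are below) =====
def Claim_equal_getKthElement : Prop := ∀ (nums1 : List Int) (nums2 : List Int) (k : Int), Dom_getKthElement nums1 nums2 k → Pre_getKthElement nums1 nums2 k → Spec_getKthElement nums1 nums2 k (getKthElement nums1 nums2 k)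

-- ===== LEMMAS AND PROOFS =====

-- both ports' element accesses, rewritten to the one canonical form (xs[t]?).getD 0
lemma pvGetA (xs : List Int) (t : Int) (ht : 0 ≤ t) :
    (PySem.List.pyGet? xs t).getD 0 = (xs[t.toNat]?).getD 0 := by
  rw [PySem.List.pyGet?_of_nonneg _ ht]

lemma pvGetB (xs : List Int) (a t : Nat) :
    (xs.drop a).getD t 0 = (xs[a + t]?).getD 0 := by
  simp [List.getD_eq_getElem?_getD, List.getElem?_drop]

-- The bisimulation: A's loop at state (i, j, k) computes what B's recursion computes on the
-- unconsumed suffixes, for any fuels large enough on each side.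
lemma pvLoop_eq_kth (fa : Nat) : ∀ (fb : Nat) (nums1 nums2 : List Int) (i j k : Int),
    0 ≤ i → i ≤ (nums1.length : Int) → 0 ≤ j → j ≤ (nums2.length : Int) → 1 ≤ k →
    k ≤ ((nums1.length : Int) - i) + ((nums2.length : Int) - j) →
    k ≤ (fa : Int) →
    ((nums1.length : Int) - i) + ((nums2.length : Int) - j) ≤ (fb : Int) →
    pvLoopA nums1 nums2 (nums1.length : Int) (nums2.length : Int) fa i j k
      = pvKthB fb (nums1.drop i.toNat) (nums2.drop j.toNat) k.toNat := by
  induction fa with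
  | zero => intro fb nums1 nums2 i j k _ _ _ _ hk1 _ hka _; omega
  | succ fa ih =>
    intro fb nums1 nums2 i j k hi0 him hj0 hjn hk1 hk2 hka hkb
    simp only [pvLoopA]
    by_cases hiM : i = (nums1.length : Int)
    · have hnil : nums1.drop i.toNat = [] := List.drop_eq_nil_of_le (by omega)
      rw [if_pos hiM, hnil]
      simp only [pvKthB]
      rw [pvGetA nums2 (j + k - 1) (by omega), pvGetB nums2 j.toNat (k.toNat - 1),
        show j.toNat + (k.toNat - 1) = (j + k - 1).toNat from by omega]
    · obtain ⟨x, a', h1⟩ : ∃ x a', nums1.drop i.toNat = x :: a' := by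
        cases h : nums1.drop i.toNat with
        | nil => exact absurd (List.drop_eq_nil_iff.mp h) (by omega)
        | cons x a' => exact ⟨x, a', rfl⟩
      have hlen1 : a'.length + 1 = nums1.length - i.toNat := by
        have := congrArg List.length h1; simp at this; omega
      rw [if_neg hiM, h1]
      by_cases hjN : j = (nums2.length : Int)
      · have hnil : nums2.drop j.toNat = [] := List.drop_eq_nil_of_le (by omega)
        rw [if_pos hjN, hnil]
        simp only [pvKthB]
        rw [show (x :: a').getD (k.toNat - 1) 0 = (nums1.drop i.toNat).getD (k.toNat - 1) 0 from by rw [h1],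
          pvGetB nums1 i.toNat (k.toNat - 1), pvGetA nums1 (i + k - 1) (by omega),
          show i.toNat + (k.toNat - 1) = (i + k - 1).toNat from by omega]
      · obtain ⟨y, b', h2⟩ : ∃ y b', nums2.drop j.toNat = y :: b' := by
          cases h : nums2.drop j.toNat with
          | nil => exact absurd (List.drop_eq_nil_iff.mp h) (by omega)
          | cons y b' => exact ⟨y, b', rfl⟩
        have hlen2 : b'.length + 1 = nums2.length - j.toNat := by
          have := congrArg List.length h2; simp at this; omega
        have hx : (nums1[i.toNat]?).getD 0 = x := by
          have : (nums1.drop i.toNat).getD 0 0 = (nums1[i.toNat + 0]?).getD 0 := pvGetB nums1 i.toNat 0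
          rw [h1] at this; simpa using this.symm
        have hy : (nums2[j.toNat]?).getD 0 = y := by
          have : (nums2.drop j.toNat).getD 0 0 = (nums2[j.toNat + 0]?).getD 0 := pvGetB nums2 j.toNat 0
          rw [h2] at this; simpa using this.symm
        rw [if_neg hjN, h2]
        obtain ⟨fb', rfl⟩ : ∃ fb', fb = fb' + 1 := ⟨fb - 1, by omega⟩
        by_cases hk : k = 1
        · simp only [hk, if_true, pvKthB]
          rw [pvGetA nums1 i hi0, pvGetA nums2 j hj0, hx, hy,
            if_pos (show (1 : Int).toNat = 1 from rfl), min_def]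
        · have hkN : ¬ (k.toNat = 1) := by omega
          simp only [if_neg hk, pvKthB, if_neg hkN]
          have hq : PySem.Int.floordiv k 2 = k / 2 :=
            PySem.Int.floordiv_eq_ediv_of_pos (by omega)
          set t1 := min (k.toNat / 2) (a'.length + 1) with ht1
          set t2 := min (k.toNat / 2) (b'.length + 1) with ht2
          have ht1b : 1 ≤ t1 ∧ (t1 : Int) ≤ k / 2 ∧ (t1 : Int) ≤ (nums1.length : Int) - i := by
            constructor
            · omega
            · constructor <;> omega
          have ht2b : 1 ≤ t2 ∧ (t2 : Int) ≤ k / 2 ∧ (t2 : Int) ≤ (nums2.length : Int) - j := by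
            constructor
            · omega
            · constructor <;> omega
          have hiNew : min (i + PySem.Int.floordiv k 2 - 1) ((nums1.length : Int) - 1)
              = i + t1 - 1 := by rw [hq]; omega
          have hjNew : min (j + PySem.Int.floordiv k 2 - 1) ((nums2.length : Int) - 1)
              = j + t2 - 1 := by rw [hq]; omega
          have hv1 : (PySem.List.pyGet? nums1 (i + t1 - 1)).getD 0
              = (x :: a').getD (t1 - 1) 0 := by
            rw [pvGetA nums1 (i + t1 - 1) (by omega), ← h1, pvGetB nums1 i.toNat (t1 - 1),
              show i.toNat + (t1 - 1) = (i + (t1 : Int) - 1).toNat from by omega]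
          have hv2 : (PySem.List.pyGet? nums2 (j + t2 - 1)).getD 0
              = (y :: b').getD (t2 - 1) 0 := by
            rw [pvGetA nums2 (j + t2 - 1) (by omega), ← h2, pvGetB nums2 j.toNat (t2 - 1),
              show j.toNat + (t2 - 1) = (j + (t2 : Int) - 1).toNat from by omega]
          rw [hiNew, hjNew, hv1, hv2]
          by_cases hcmp : (x :: a').getD (t1 - 1) 0 ≤ (y :: b').getD (t2 - 1) 0
          · rw [if_pos hcmp, if_pos hcmp,
              show (x :: a').drop t1 = nums1.drop (i + t1 - 1 + 1).toNat from by
                rw [← h1, List.drop_drop]; congr 1; omega,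
              show k - (i + t1 - 1 - i + 1) = k - t1 from by omega,
              show k.toNat - t1 = (k - t1).toNat from by omega, ← h2]
            exact ih fb' nums1 nums2 (i + t1 - 1 + 1) j (k - t1)
              (by omega) (by omega) hj0 hjn (by omega) (by omega) (by omega) (by omega)
          · rw [if_neg hcmp, if_neg hcmp,
              show (y :: b').drop t2 = nums2.drop (j + t2 - 1 + 1).toNat from by
                rw [← h2, List.drop_drop]; congr 1; omega,
              show k - (j + t2 - 1 - j + 1) = k - t2 from by omega,
              show k.toNat - t2 = (k - t2).toNat from by omega, ← h1]
            exact ih fb' nums1 nums2 i (j + t2 - 1 + 1) (k - t2)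
              hi0 him (by omega) (by omega) (by omega) (by omega) (by omega) (by omega)

-- ===== VERDICT (by name: the statement is the Claim_ definition above) =====
theorem getKthElement_spec : Claim_equal_getKthElement := by
  intro nums1 nums2 k _ hpre
  unfold Spec_getKthElement getKthElement getKthElement_alt
  have := pvLoop_eq_kth (k.toNat + 1) (nums1.length + nums2.length) nums1 nums2 0 0 k
    le_rfl (by simp) le_rfl (by simp) hpre.1 (by have := hpre.2; omega)
    (by omega) (by push_cast; omega)
  simpa using this
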